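-- pv_equiv track=rewrite | github.com/semajson/aoc2017 | day04/day04.py | part1_solve
-- ===== SOURCE A (Python) =====
-- def part1_solve(passphrases):
--     valid_passphrases = 0
--
--     for passphrase in passphrases:
--         passphrase = passphrase.split(" ")
--         seen_words = set()
--         is_valid = True
--
--         # Don't allow duplicate words in the passphrase
--         for word in passphrase:
--             if word not in seen_words:
--                 seen_words.add(word)
--             else:
--                 # This is an invalid passphrase, break
--                 is_valid = False
--                 break
--
--         if is_valid:
--             valid_passphrases += 1
--
--     return valid_passphrases
-- ===== SOURCE B (Python) =====
-- def part1_solve(passphrases):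
--     def ok(p):
--         ws = sorted(p.split(" "))
--         return all(a != b for a, b in zip(ws, ws[1:]))
--     return len([p for p in passphrases if ok(p)])
-- ===== Notes on version B (the rewrite author's own statement) =====
-- stated objective: alternative
-- what changed: Replaces the incremental seen-set membership scan and running counter with a filter-and-count over a sort-then-adjacent-pair duplicate check (zip of the sorted word list with its tail).
import Mathlib
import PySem

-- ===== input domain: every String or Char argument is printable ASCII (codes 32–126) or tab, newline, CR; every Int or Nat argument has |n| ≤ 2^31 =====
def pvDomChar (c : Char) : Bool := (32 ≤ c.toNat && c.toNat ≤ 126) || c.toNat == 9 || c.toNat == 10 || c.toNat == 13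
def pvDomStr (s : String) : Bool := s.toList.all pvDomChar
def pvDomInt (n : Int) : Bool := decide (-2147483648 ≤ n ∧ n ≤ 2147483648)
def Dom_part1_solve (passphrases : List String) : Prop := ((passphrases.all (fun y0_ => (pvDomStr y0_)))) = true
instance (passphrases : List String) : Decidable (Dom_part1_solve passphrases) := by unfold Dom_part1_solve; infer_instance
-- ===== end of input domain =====

-- B replaces A's seen-set scan with counter by a filter-and-count over a sort-then-adjacent-pair check (alternative decomposition, same results).
-- ===== PORT A =====
-- A's inner loop: walk the words, keep a seen-set, break False at the first repeat.
def pvALoop (seen : PySem.Set String) : List String → Bool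
  | [] => true
  | w :: ws => if seen.contains w then false else pvALoop (seen.add w) ws

-- sep is the literal " " (nonempty), so split? is always `some`; getD [] is exact here.
def part1_solve (passphrases : List String) : Int :=
  passphrases.foldl (fun acc p =>
    if pvALoop (PySem.Set.ofList []) ((PySem.Str.split? p " ").getD []) then acc + 1 else acc) 0

-- ===== PORT B =====
-- Source B's ok: sort the words, then all(a != b) over zip(ws, ws[1:]).
def pvOk (p : String) : Bool :=
  let ws := PySem.List.sorted ((PySem.Str.split? p " ").getD []) (fun w => w)
  (ws.zip ws.tail).all (fun ab => ab.1 != ab.2)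

-- Source B's count: length of the filtered list comprehension.
def part1_solve_alt (passphrases : List String) : Int :=
  ((passphrases.filter pvOk).length : Int)

-- ===== PRECONDITION & SPEC =====
def Spec_part1_solve (passphrases : List String) (out : Int) : Prop := out = part1_solve_alt passphrases
instance (passphrases : List String) (out : Int) : Decidable (Spec_part1_solve passphrases out) := by unfold Spec_part1_solve; infer_instance

-- ===== CLAIM =====
def Claim_equal_part1_solve : Prop := ∀ (passphrases : List String), Dom_part1_solve passphrases → Spec_part1_solve passphrases (part1_solve passphrases)

-- ===== LEMMAS AND PROOFS =====

lemma pvALoop_iff (ws : List String) : ∀ seen : PySem.Set String,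
    pvALoop seen ws = true ↔ ws.Nodup ∧ ∀ w ∈ ws, ¬ w ∈ seen := by
  induction ws with
  | nil => intro seen; simp [pvALoop]
  | cons w ws ih =>
      intro seen
      simp only [pvALoop]
      by_cases h : seen.contains w = true
      · simp only [h, if_true]
        constructor
        · intro hf; cases hf
        · rintro ⟨-, hall⟩
          exact absurd ((PySem.Set.contains_iff seen w).mp h) (hall w (by simp))
      · simp only [Bool.not_eq_true] at h
        rw [h]
        simp only [Bool.false_eq_true, if_false, ih]
        constructor
        · rintro ⟨hnd, hall⟩
          refine ⟨List.nodup_cons.mpr ⟨fun hm => ?_, hnd⟩, ?_⟩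
          · exact (hall w hm) (((PySem.Set.mem_add seen w w).mpr (Or.inr rfl)))
          · intro x hx hc
            rcases List.mem_cons.mp hx with rfl | hx'
            · have hct := (PySem.Set.contains_iff seen x).mpr hc
              rw [h] at hct
              cases hct
            · exact hall x hx' ((PySem.Set.mem_add seen w x).mpr (Or.inl hc))
        · rintro ⟨hnd, hall⟩
          rcases List.nodup_cons.mp hnd with ⟨hw, hnd'⟩
          refine ⟨hnd', fun x hx hc => ?_⟩
          rcases (PySem.Set.mem_add seen w x).mp hc with hc' | rfl
          · exact hall x (by simp [hx]) hc'
          · exact hw hx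

lemma pvZipAll_iff_chain (ys : List String) :
    ((ys.zip ys.tail).all (fun ab => ab.1 != ab.2)) = true ↔
      List.IsChain (fun a b => a ≠ b) ys := by
  induction ys with
  | nil => simp
  | cons a t ih =>
      cases t with
      | nil => simp
      | cons b t' =>
          rw [List.isChain_cons_cons, ← ih]
          simp [List.zip, List.all_cons, bne_iff_ne]

lemma pvIsChain_and {α : Type} {R S : α → α → Prop} (l : List α)
    (hR : List.IsChain R l) (hS : List.IsChain S l) :
    List.IsChain (fun a b => R a b ∧ S a b) l := by
  induction l with
  | nil => exact List.isChain_nil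
  | cons a t ih =>
      cases t with
      | nil => exact List.isChain_singleton a
      | cons b t' =>
          rw [List.isChain_cons_cons] at hR hS ⊢
          exact ⟨⟨hR.1, hS.1⟩, ih hR.2 hS.2⟩

lemma pvOk_iff_nodup (p : String) :
    pvOk p = true ↔ ((PySem.Str.split? p " ").getD []).Nodup := by
  unfold pvOk
  set ws := (PySem.Str.split? p " ").getD []
  have hperm := PySem.List.sorted_perm ws (fun w => w) false
  have hpw := PySem.List.sorted_pairwise ws (fun w => w)
  rw [pvZipAll_iff_chain]
  constructor
  · intro hch
    have hlt : List.IsChain (fun a b : String => a < b) (PySem.List.sorted ws (fun w => w)) :=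
      (pvIsChain_and _ hpw.isChain hch).imp (fun a b h => lt_of_le_of_ne h.1 h.2)
    have hp : (PySem.List.sorted ws (fun w => w)).Pairwise (· < ·) :=
      List.isChain_iff_pairwise.mp hlt
    exact hperm.nodup_iff.mp (hp.imp ne_of_lt)
  · intro hnd
    exact (hperm.nodup_iff.mpr hnd).isChain

lemma pvInner_eq (p : String) :
    pvALoop (PySem.Set.ofList []) ((PySem.Str.split? p " ").getD []) = pvOk p := by
  set ws := (PySem.Str.split? p " ").getD []
  by_cases h : ws.Nodup
  · rw [(pvALoop_iff ws (PySem.Set.ofList [])).mpr ⟨h, by intro w hw hc; simp at hc⟩,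
      (pvOk_iff_nodup p).mpr h]
  · have h1 : pvALoop (PySem.Set.ofList []) ws ≠ true := fun hc => h ((pvALoop_iff ws _).mp hc).1
    have h2 : pvOk p ≠ true := fun hc => h ((pvOk_iff_nodup p).mp hc)
    simp only [Bool.not_eq_true] at h1 h2
    rw [h1, h2]

lemma pvFoldl_count (l : List String) : ∀ acc : Int,
    l.foldl (fun acc p => if pvOk p then acc + 1 else acc) acc
      = acc + ((l.filter pvOk).length : Int) := by
  induction l with
  | nil => intro acc; simp
  | cons p t ih =>
      intro acc
      simp only [List.foldl_cons, List.filter_cons]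
      by_cases h : pvOk p = true
      · rw [h, if_pos rfl, if_pos rfl, ih]
        simp only [List.length_cons]
        push_cast
        ring
      · simp only [Bool.not_eq_true] at h
        rw [h]
        simp only [Bool.false_eq_true, if_false, ih]

-- ===== VERDICT =====
theorem part1_solve_spec : Claim_equal_part1_solve := by
  intro passphrases hd
  unfold Spec_part1_solve part1_solve part1_solve_alt
  simp only [pvInner_eq]
  rw [pvFoldl_count]
  simp
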